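-- pv_equiv track=rewrite | github.com/BLIPNTU/LEO | blipleo/leocsv.py | cut_flat_row
-- ===== SOURCE A (Python) =====
-- def cut_flat_row(row):
--     """ Convert Feiting's flat CSV file (1 row per participant) into LEO's CSV files (1 file per participant)
--     (i.e. 1 flat-row is 1 multiple-row CSV file)
--
--     The multiple-row format is easier to debug when errors happen.
--     It's also closer to the LEO JSON format.
--     """
--     cut_points = [idx for idx in range(len(row)) if idx in (0, 2) or '__' in row[idx]]
--     parts = []
--     for idx, c in enumerate(cut_points):
--         if idx == len(cut_points) - 1:
--             part = row[c:]
--         else: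
--             part = row[c:cut_points[idx + 1]]
--         parts.append([x for x in part if x])
--     return parts
-- ===== SOURCE B (Python) =====
-- def cut_flat_row(row):
--     """Single reverse pass: accumulate the current part right-to-left and flush it
--     at each boundary (index 0, 2, or a '__' marker); reversals restore order."""
--     parts = []
--     cur = []
--     for idx in range(len(row) - 1, -1, -1):
--         x = row[idx]
--         if x:
--             cur.append(x)
--         if idx in (0, 2) or '__' in x:
--             cur.reverse()
--             parts.append(cur)
--             cur = []
--     parts.reverse()
--     return parts
-- ===== Notes on version B (the rewrite author's own statement) =====
-- stated objective: alternative
-- what changed: Replaced the two-phase algorithm (materialise a cut_points index list, then slice the row between consecutive cut points and filter) by a single reverse pass over the row that accumulates the current part and flushes it at each boundary, never building an index list or slicing.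
import Mathlib
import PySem

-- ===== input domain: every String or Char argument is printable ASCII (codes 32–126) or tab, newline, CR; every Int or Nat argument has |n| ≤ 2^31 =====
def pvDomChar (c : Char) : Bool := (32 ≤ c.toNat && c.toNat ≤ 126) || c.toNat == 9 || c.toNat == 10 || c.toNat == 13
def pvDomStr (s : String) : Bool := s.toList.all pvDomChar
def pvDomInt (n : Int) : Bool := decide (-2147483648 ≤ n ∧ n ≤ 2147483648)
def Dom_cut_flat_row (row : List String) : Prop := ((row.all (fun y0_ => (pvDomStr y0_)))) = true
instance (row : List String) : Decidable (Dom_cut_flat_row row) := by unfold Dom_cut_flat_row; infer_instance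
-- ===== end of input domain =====

-- B replaces A's two-phase cut-points-then-slice algorithm by a single reverse pass
-- that accumulates the current part and flushes it at each boundary (objective: alternative).

-- ===== PORT A =====
-- cut_points = [idx for idx in range(len(row)) if idx in (0, 2) or '__' in row[idx]]
-- (row[idx] is always in range here, so pyGetD with default "" is exact);
-- then for idx, c in enumerate(cut_points): slice row[c:] or row[c:cut_points[idx+1]],
-- filter the truthy (nonempty) strings, append to parts.
def cut_flat_row (row : List String) : List (List String) :=
  let cut_points : List Int :=
    (PySem.List.pyRange 0 (row.length : Int) 1).filter
      (fun idx => idx == 0 || idx == 2 || PySem.Str.isIn "__" (PySem.List.pyGetD row idx ""))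
  (PySem.List.enumerate cut_points 0).foldl
    (fun parts p =>
      let part : List String :=
        if p.1 == (cut_points.length : Int) - 1 then
          PySem.List.slice row (some p.2) none
        else
          PySem.List.slice row (some p.2) (some (PySem.List.pyGetD cut_points (p.1 + 1) 0))
      parts ++ [part.filter (fun x => x ≠ "")])
    []

-- ===== PORT B =====
-- Reverse loop 'for idx in range(len(row)-1, -1, -1)' over (idx, row[idx]) pairs:
-- ported as a foldr over enumerate row (same pairs, visited right to left).
-- State is (parts, cur); 'cur.append(x)' = st.2 ++ [p.2], 'cur.reverse()' /
-- 'parts.reverse()' = List.reverse, 'parts.append(cur)' = st.1 ++ [...].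
def cut_flat_row_alt (row : List String) : List (List String) :=
  ((PySem.List.enumerate row 0).foldr
    (fun (p : Int × String) (st : List (List String) × List String) =>
      let cur' : List String := if p.2 ≠ "" then st.2 ++ [p.2] else st.2
      if p.1 == 0 || p.1 == 2 || PySem.Str.isIn "__" p.2 then (st.1 ++ [cur'.reverse], ([] : List String))
      else (st.1, cur'))
    ([], [])).1.reverse

-- ===== PRECONDITION & SPEC =====
def Spec_cut_flat_row (row : List String) (out : List (List String)) : Prop := out = cut_flat_row_alt row
instance (row : List String) (out : List (List String)) : Decidable (Spec_cut_flat_row row out) := by unfold Spec_cut_flat_row; infer_instance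

-- ===== CLAIM (what is proved, stated in full; the proofs are below) =====
def Claim_equal_cut_flat_row : Prop := ∀ (row : List String), Dom_cut_flat_row row → Spec_cut_flat_row row (cut_flat_row row)

-- ===== LEMMAS AND PROOFS =====

-- boundary test on an (absolute index, element) pair
def pvBnd (p : Int × String) : Bool := p.1 == 0 || p.1 == 2 || PySem.Str.isIn "__" p.2

-- tag each enumerated element with its boundary bit
def pvTag (e : List (Int × String)) : List (Bool × String) := e.map (fun p => (pvBnd p, p.2))

-- cut-point positions (relative, as Nats) of a tagged list
def pvCps : List (Bool × String) → List Nat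
  | [] => []
  | (b, _) :: t => (if b then [0] else []) ++ (pvCps t).map (· + 1)

-- filtered prefix before the first boundary
def pvPre : List (Bool × String) → List String
  | [] => []
  | (b, x) :: t => if b then [] else (if x ≠ "" then x :: pvPre t else pvPre t)

-- the parts: one filtered segment per boundary, each running to the next boundary
def pvSegs : List (Bool × String) → List (List String)
  | [] => []
  | (b, x) :: t =>
      if b then (if x ≠ "" then x :: pvPre t else pvPre t) :: pvSegs t else pvSegs t

-- A's slice-per-cut-point loop, on Nat cut points, as drop/take
def pvParts (row : List String) : List Nat → List (List String)
  | [] => []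
  | [c] => [(row.drop c).filter (fun x => x ≠ "")]
  | c :: c' :: r =>
      ((row.drop c).take (c' - c)).filter (fun x => x ≠ "") :: pvParts row (c' :: r)

theorem pvTag_cons (p : Int × String) (e : List (Int × String)) :
    pvTag (p :: e) = (pvBnd p, p.2) :: pvTag e := rfl

-- ===== B side: the foldr computes (segs, pre) of the tagged list, reversed =====
theorem pvFoldrB (e : List (Int × String)) :
    (e.foldr
      (fun (p : Int × String) (st : List (List String) × List String) =>
        let cur' : List String := if p.2 ≠ "" then st.2 ++ [p.2] else st.2
        if p.1 == 0 || p.1 == 2 || PySem.Str.isIn "__" p.2 then (st.1 ++ [cur'.reverse], ([] : List String))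
        else (st.1, cur'))
      ([], [])) = ((pvSegs (pvTag e)).reverse, (pvPre (pvTag e)).reverse) := by
  induction e with
  | nil => rfl
  | cons p t ih =>
      simp only [List.foldr_cons, ih, pvTag_cons, pvSegs, pvPre, pvBnd]
      split_ifs <;> simp_all

theorem cut_flat_row_alt_eq (row : List String) :
    cut_flat_row_alt row = pvSegs (pvTag (PySem.List.enumerate row 0)) := by
  unfold cut_flat_row_alt
  rw [pvFoldrB, List.reverse_reverse]

-- ===== A side =====

-- cut points of 'enumerate xs s' are the relative cut points shifted by s
theorem pvCps_enumerate (xs : List String) (s : Int) :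
    ((PySem.List.enumerate xs s).filter pvBnd).map (·.1)
      = (pvCps (pvTag (PySem.List.enumerate xs s))).map (fun (n : Nat) => s + (n : Int)) := by
  induction xs generalizing s with
  | nil => rfl
  | cons x t ih =>
      rw [PySem.List.enumerate_cons, pvTag_cons]
      by_cases hb : pvBnd (s, x) = true <;>
        simp [pvCps, hb, ih, List.map_map, Function.comp_def, add_comm, add_left_comm]

-- the foldl-append loop is a map
theorem pvFoldlA (cs : List Int) (f : Int × Int → List String) :
    ((PySem.List.enumerate cs 0).foldl (fun parts p => parts ++ [f p]) [])
      = (PySem.List.enumerate cs 0).map f := by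
  simpa using PySem.List.foldl_append_singleton_eq_map f (PySem.List.enumerate cs 0) []

-- A's per-cut-point map equals the consecutive-pair recursion pvParts,
-- for cut points that are Nat casts
theorem pvMapA (row : List String) (full pre suf : List Nat)
    (hfull : full = pre ++ suf) :
    (PySem.List.enumerate (suf.map (fun (n : Nat) => (n : Int))) (pre.length)).map
      (fun p =>
        (if p.1 == ((full.map (fun (n : Nat) => (n : Int))).length : Int) - 1 then
            PySem.List.slice row (some p.2) none
          else
            PySem.List.slice row (some p.2)
              (some (PySem.List.pyGetD (full.map (fun (n : Nat) => (n : Int))) (p.1 + 1) 0))).filter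
          (fun x => x ≠ ""))
      = pvParts row suf := by
  induction suf generalizing pre with
  | nil => rfl
  | cons c suf' ih =>
    cases suf' with
    | nil =>
        subst hfull
        simp [PySem.List.enumerate_cons, pvParts, PySem.List.slice_from_natCast]
    | cons c' r =>
        subst hfull
        rw [show (List.map (fun (n : Nat) => (n : Int)) (c :: c' :: r))
              = ((c : Int) :: List.map (fun (n : Nat) => (n : Int)) (c' :: r)) from rfl,
           PySem.List.enumerate_cons]
        simp only [List.map_cons, pvParts]
        have hlen : ((pre ++ c :: c' :: r).map (fun (n : Nat) => (n : Int))).length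
            = pre.length + (r.length + 2) := by simp
        have hcond : ((pre.length : Int) == ((((pre ++ c :: c' :: r).map (fun (n : Nat) => (n : Int))).length : Int) - 1)) = false := by
          rw [hlen]; simp; omega
        have hget : PySem.List.pyGetD ((pre ++ c :: c' :: r).map (fun (n : Nat) => (n : Int))) ((pre.length : Int) + 1) 0
            = (c' : Int) := by
          have h1 : ((pre.length : Int) + 1) = ((pre.length + 1 : Nat) : Int) := by push_cast; ring
          rw [h1, PySem.List.pyGetD_natCast]
          rw [List.map_append]
          rw [List.getD_eq_getElem?_getD, List.getElem?_append_right (by simp)]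
          simp
        refine congrArg₂ List.cons ?_ ?_
        · rw [hcond]
          simp only [Bool.false_eq_true, if_false, hget, PySem.List.slice_natCast]
        · have hs : ((pre.length : Int) + 1) = (((pre ++ [c]).length : Nat) : Int) := by
            simp
          rw [hs]
          have := ih (pre ++ [c]) (by simp)
          simpa using this

-- shifting all cut points past a prepended element leaves the parts unchanged
theorem pvShift (x : String) (t : List String) (cs : List Nat) :
    pvParts (x :: t) (cs.map (· + 1)) = pvParts t cs := by
  induction cs with
  | nil => rfl
  | cons c cs' ih =>
      cases cs' with
      | nil => simp [pvParts]
      | cons c' r =>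
          simp only [List.map_cons, pvParts] at *
          rw [ih]
          refine congrArg₂ List.cons ?_ rfl
          simp [Nat.add_sub_add_right]

-- no boundary at all: no parts, and the prefix is everything
theorem pvSegs_of_cps_nil (l : List (Bool × String)) (h : pvCps l = []) :
    pvSegs l = [] := by
  induction l with
  | nil => rfl
  | cons p t ih =>
      obtain ⟨b, x⟩ := p
      by_cases hb : b = true
      · simp [pvCps, hb] at h
      · simp only [pvCps, hb, Bool.false_eq_true, if_false, List.nil_append,
          List.map_eq_nil_iff] at h
        simp [pvSegs, hb, ih h]

theorem pvPre_of_cps_nil (l : List (Bool × String)) (h : pvCps l = []) :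
    pvPre l = (l.map (·.2)).filter (fun x => x ≠ "") := by
  induction l with
  | nil => rfl
  | cons p t ih =>
      obtain ⟨b, x⟩ := p
      by_cases hb : b = true
      · simp [pvCps, hb] at h
      · simp only [pvCps, hb, Bool.false_eq_true, if_false, List.nil_append,
          List.map_eq_nil_iff] at h
        simp only [pvPre, hb, Bool.false_eq_true, if_false, ih h, List.map_cons,
          List.filter_cons]
        by_cases hx : x = "" <;> simp [hx]

-- the filtered prefix is the filtered take up to the first cut point
theorem pvPre_of_cps_cons (l : List (Bool × String)) (c : Nat) (cs : List Nat)
    (h : pvCps l = c :: cs) :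
    pvPre l = ((l.map (·.2)).take c).filter (fun x => x ≠ "") := by
  induction l generalizing c cs with
  | nil => simp [pvCps] at h
  | cons p t ih =>
      obtain ⟨b, x⟩ := p
      by_cases hb : b = true
      · simp only [pvCps, hb, if_true, List.cons_append, List.nil_append,
          List.cons.injEq] at h
        obtain ⟨hc, -⟩ := h
        simp [pvPre, hb, ← hc]
      · simp only [pvCps, hb, Bool.false_eq_true, if_false, List.nil_append] at h
        cases hcp : pvCps t with
        | nil => rw [hcp] at h; simp at h
        | cons c0 cs0 =>
            rw [hcp] at h
            simp only [List.map_cons, List.cons.injEq] at h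
            obtain ⟨hc, -⟩ := h
            simp only [pvPre, hb, Bool.false_eq_true, if_false, ih c0 cs0 hcp,
              List.map_cons, ← hc, List.take_succ_cons, List.filter_cons]
            by_cases hx : x = "" <;> simp [hx]

-- main: parts between consecutive cut points = the streamed segments
theorem pvMain (l : List (Bool × String)) :
    pvParts (l.map (·.2)) (pvCps l) = pvSegs l := by
  induction l with
  | nil => rfl
  | cons p t ih =>
      obtain ⟨b, x⟩ := p
      by_cases hb : b = true
      · subst hb
        simp only [pvCps, if_true, List.cons_append, List.nil_append, List.map_cons,
          pvSegs]
        cases hcp : pvCps t with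
        | nil =>
            simp only [List.map_nil, pvParts]
            rw [pvPre_of_cps_nil t hcp, pvSegs_of_cps_nil t hcp]
            simp only [List.drop_zero, List.filter_cons]
            by_cases hx : x = "" <;> simp [hx]
        | cons c0 cs0 =>
            simp only [List.map_cons, pvParts]
            refine congrArg₂ List.cons ?_ ?_
            · rw [pvPre_of_cps_cons t c0 cs0 hcp]
              simp only [List.drop_zero, Nat.sub_zero, List.take_succ_cons,
                List.filter_cons]
              by_cases hx : x = "" <;> simp [hx]
            · rw [show ((c0 + 1) :: List.map (· + 1) cs0)
                    = List.map (· + 1) (c0 :: cs0) from rfl, pvShift, ← hcp, ih]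
      · simp only [pvCps, hb, Bool.false_eq_true, if_false, List.nil_append,
          List.map_cons, pvSegs, pvShift, ih]

-- the range-comprehension cut point list is the (cast) relative cut points of the tagged row
theorem pvCutPoints_eq (row : List String) :
    (PySem.List.pyRange 0 (row.length : Int) 1).filter
        (fun idx => idx == 0 || idx == 2 || PySem.Str.isIn "__" (PySem.List.pyGetD row idx ""))
      = (pvCps (pvTag (PySem.List.enumerate row 0))).map (fun (n : Nat) => (n : Int)) := by
  have h1 : PySem.List.enumerate row 0
      = (PySem.List.pyRange 0 (row.length : Int) 1).map
          (fun j => (j, PySem.List.pyGetD row j "")) := by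
    simpa using PySem.List.enumerate_eq_map_pyRange row ""
  have h2 : ((PySem.List.enumerate row 0).filter pvBnd).map (·.1)
      = (PySem.List.pyRange 0 (row.length : Int) 1).filter
          (fun idx => idx == 0 || idx == 2 || PySem.Str.isIn "__" (PySem.List.pyGetD row idx "")) := by
    rw [h1, List.filter_map, List.map_map]
    simp only [Function.comp_def, pvBnd]
    exact List.map_id _
  rw [← h2, pvCps_enumerate row 0]
  apply List.map_congr_left
  intro n _
  simp

theorem cut_flat_row_eq (row : List String) :
    cut_flat_row row = pvSegs (pvTag (PySem.List.enumerate row 0)) := by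
  unfold cut_flat_row
  simp only [pvCutPoints_eq]
  rw [pvFoldlA]
  have hsnd : (pvTag (PySem.List.enumerate row 0)).map (·.2) = row := by
    simp [pvTag, List.map_map, Function.comp_def, PySem.List.map_snd_enumerate]
  have := pvMapA row (pvCps (pvTag (PySem.List.enumerate row 0))) []
      (pvCps (pvTag (PySem.List.enumerate row 0))) (by simp)
  rw [← pvMain, hsnd]
  simpa using this

-- ===== VERDICT (by name: the statement is the Claim_ definition above) =====
theorem cut_flat_row_spec : Claim_equal_cut_flat_row := by
  intro row _
  unfold Spec_cut_flat_row
  rw [cut_flat_row_eq, cut_flat_row_alt_eq]
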